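-- pv_equiv track=rewrite | github.com/conchoecia/genome_assembly_pipelines | scripts/trim_redundant_regions.py | calculate_non_redundant_pieces
-- ===== SOURCE A (Python) =====
-- def calculate_non_redundant_pieces(contig_length, redundant_regions, min_piece_size):
--     """
--     Calculate non-redundant pieces from a contig.
--
--     Args:
--         contig_length: Total length of contig
--         redundant_regions: List of (start, end) redundant intervals
--         min_piece_size: Minimum size of pieces to keep
--
--     Returns:
--         List of (start, end) tuples for non-redundant pieces
--     """
--     if not redundant_regions:
--         # No redundant regions, keep entire contig
--         return [(0, contig_length)]
--
--     pieces = []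
--     last_end = 0
--
--     for start, end in sorted(redundant_regions):
--         # Add non-redundant piece before this redundant region
--         if start > last_end:
--             piece_size = start - last_end
--             if piece_size >= min_piece_size:
--                 pieces.append((last_end, start))
--
--         last_end = max(last_end, end)
--
--     # Add final piece after last redundant region
--     if last_end < contig_length:
--         piece_size = contig_length - last_end
--         if piece_size >= min_piece_size:
--             pieces.append((last_end, contig_length))
--
--     return pieces
-- ===== SOURCE B (Python) =====
-- def calculate_non_redundant_pieces(contig_length, redundant_regions, min_piece_size):
--     """Two-pass computation: merge the sorted redundant intervals into maximal
--     blocks, then sweep the merged blocks emitting the uncovered gaps that meet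
--     the minimum size."""
--     if not redundant_regions:
--         return [(0, contig_length)]
--
--     # Pass 1: standard interval merge over the sorted regions.
--     srt = sorted(redundant_regions)
--     merged = []
--     cur = srt[0]
--     for s, e in srt[1:]:
--         if s <= cur[1]:
--             cur = (cur[0], max(cur[1], e))
--         else:
--             merged.append(cur)
--             cur = (s, e)
--     merged.append(cur)
--
--     # Pass 2: sweep the blocks, tracking the furthest covered coordinate,
--     # and emit each sufficiently large uncovered gap.
--     pieces = []
--     covered = 0
--     for s, e in merged:
--         if s > covered and s - covered >= min_piece_size:
--             pieces.append((covered, s))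
--         covered = max(covered, e)
--     if covered < contig_length and contig_length - covered >= min_piece_size:
--         pieces.append((covered, contig_length))
--     return pieces
-- ===== Notes on version B (the rewrite author's own statement) =====
-- stated objective: alternative
-- what changed: A's single scan that emits gap pieces while tracking a running end is replaced by a two-pass decomposition: a standard interval merge of the sorted regions into disjoint blocks, then a separate sweep over the merged blocks emitting the size-filtered uncovered gaps (the empty-regions early return is kept).
import Mathlib
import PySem

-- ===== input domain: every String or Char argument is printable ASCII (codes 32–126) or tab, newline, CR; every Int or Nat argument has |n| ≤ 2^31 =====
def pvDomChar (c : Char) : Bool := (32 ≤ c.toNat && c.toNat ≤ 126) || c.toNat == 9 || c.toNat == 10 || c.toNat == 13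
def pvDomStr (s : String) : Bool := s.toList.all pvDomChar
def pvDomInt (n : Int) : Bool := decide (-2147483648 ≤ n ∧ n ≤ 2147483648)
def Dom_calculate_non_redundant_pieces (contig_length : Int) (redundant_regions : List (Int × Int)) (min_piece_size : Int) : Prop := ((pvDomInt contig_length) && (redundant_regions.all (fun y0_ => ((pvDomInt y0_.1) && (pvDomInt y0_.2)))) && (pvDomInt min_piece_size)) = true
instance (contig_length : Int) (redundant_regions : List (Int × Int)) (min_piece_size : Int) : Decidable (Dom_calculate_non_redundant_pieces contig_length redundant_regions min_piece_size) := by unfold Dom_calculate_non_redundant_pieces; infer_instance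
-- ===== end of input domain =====

-- B replaces A's single accumulate-while-scanning loop by two passes (a standard
-- interval merge of the sorted regions, then a sweep emitting the uncovered gaps);
-- same cost, objective: alternative decomposition. Proved extensionally equal to A.

-- ===== PORT A =====
-- Literal port of A: one fold over sorted(redundant_regions) carrying
-- (pieces, last_end), then the final tail piece.
def calculate_non_redundant_pieces (contig_length : Int) (redundant_regions : List (Int × Int)) (min_piece_size : Int) : List (Int × Int) :=
  if redundant_regions = [] then [(0, contig_length)]
  else
    let st := (PySem.List.sorted2 redundant_regions Prod.fst Prod.snd).foldl
      (fun (st : List (Int × Int) × Int) (p : Int × Int) =>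
        (if p.1 > st.2 ∧ p.1 - st.2 ≥ min_piece_size then st.1 ++ [(st.2, p.1)] else st.1,
         max st.2 p.2)) ([], 0)
    if st.2 < contig_length ∧ contig_length - st.2 ≥ min_piece_size
    then st.1 ++ [(st.2, contig_length)] else st.1

-- ===== PORT B =====
-- Literal port of B (Source B): pass 1 folds the sorted tail into merged blocks
-- (merged, cur); pass 2 folds the merged blocks into the gap pieces.
def calculate_non_redundant_pieces_alt (contig_length : Int) (redundant_regions : List (Int × Int)) (min_piece_size : Int) : List (Int × Int) :=
  if redundant_regions = [] then [(0, contig_length)]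
  else
    match PySem.List.sorted2 redundant_regions Prod.fst Prod.snd with
    | [] => []  -- unreachable: sorted of a nonempty list is nonempty
    | c0 :: rest =>
      let st1 := rest.foldl
        (fun (st : List (Int × Int) × (Int × Int)) (p : Int × Int) =>
          if p.1 ≤ st.2.2 then (st.1, (st.2.1, max st.2.2 p.2))
          else (st.1 ++ [st.2], (p.1, p.2))) ([], c0)
      let merged := st1.1 ++ [st1.2]
      let st2 := merged.foldl
        (fun (st : List (Int × Int) × Int) (p : Int × Int) =>
          (if p.1 > st.2 ∧ p.1 - st.2 ≥ min_piece_size then st.1 ++ [(st.2, p.1)] else st.1,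
           max st.2 p.2)) ([], 0)
      if st2.2 < contig_length ∧ contig_length - st2.2 ≥ min_piece_size
      then st2.1 ++ [(st2.2, contig_length)] else st2.1

-- ===== PRECONDITION & SPEC =====
def Spec_calculate_non_redundant_pieces (contig_length : Int) (redundant_regions : List (Int × Int)) (min_piece_size : Int) (out : List (Int × Int)) : Prop := out = calculate_non_redundant_pieces_alt contig_length redundant_regions min_piece_size
instance (contig_length : Int) (redundant_regions : List (Int × Int)) (min_piece_size : Int) (out : List (Int × Int)) : Decidable (Spec_calculate_non_redundant_pieces contig_length redundant_regions min_piece_size out) := by unfold Spec_calculate_non_redundant_pieces; infer_instance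

-- ===== CLAIM (what is proved, stated in full; the proofs are below) =====
def Claim_equal_calculate_non_redundant_pieces : Prop := ∀ (contig_length : Int) (redundant_regions : List (Int × Int)) (min_piece_size : Int), Dom_calculate_non_redundant_pieces contig_length redundant_regions min_piece_size → Spec_calculate_non_redundant_pieces contig_length redundant_regions min_piece_size (calculate_non_redundant_pieces contig_length redundant_regions min_piece_size)

-- ===== LEMMAS AND PROOFS =====

-- The gap-emitting fold step shared (syntactically) by A's loop and B's pass 2.
def pvGStep (m : Int) (st : List (Int × Int) × Int) (p : Int × Int) : List (Int × Int) × Int :=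
  (if p.1 > st.2 ∧ p.1 - st.2 ≥ m then st.1 ++ [(st.2, p.1)] else st.1, max st.2 p.2)

-- "Run the gap fold over t from (acc, last), then the tail piece."
def pvF (L m : Int) (t : List (Int × Int)) (acc : List (Int × Int)) (last : Int) : List (Int × Int) :=
  let st := t.foldl (pvGStep m) (acc, last)
  if st.2 < L ∧ L - st.2 ≥ m then st.1 ++ [(st.2, L)] else st.1

theorem pvF_cons (L m : Int) (x : Int × Int) (t : List (Int × Int)) (acc : List (Int × Int)) (last : Int) :
    pvF L m (x :: t) acc last = pvF L m t (pvGStep m (acc, last) x).1 (pvGStep m (acc, last) x).2 := rfl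

-- Recursive presentation of B's merge loop.
def pvMergeRec : List (Int × Int) → (Int × Int) → List (Int × Int)
  | [], cur => [cur]
  | p :: t, cur =>
    if p.1 ≤ cur.2 then pvMergeRec t (cur.1, max cur.2 p.2)
    else cur :: pvMergeRec t (p.1, p.2)

theorem pvMerge_fold (t : List (Int × Int)) :
    ∀ (acc : List (Int × Int)) (cur : Int × Int),
    (t.foldl (fun (st : List (Int × Int) × (Int × Int)) (p : Int × Int) =>
        if p.1 ≤ st.2.2 then (st.1, (st.2.1, max st.2.2 p.2))
        else (st.1 ++ [st.2], (p.1, p.2))) (acc, cur)).1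
      ++ [(t.foldl (fun (st : List (Int × Int) × (Int × Int)) (p : Int × Int) =>
        if p.1 ≤ st.2.2 then (st.1, (st.2.1, max st.2.2 p.2))
        else (st.1 ++ [st.2], (p.1, p.2))) (acc, cur)).2]
    = acc ++ pvMergeRec t cur := by
  induction t with
  | nil => intro acc cur; simp [pvMergeRec]
  | cons p t ih =>
    intro acc cur
    by_cases h : p.1 ≤ cur.2
    · simp only [List.foldl_cons, pvMergeRec, if_pos h]
      exact ih acc (cur.1, max cur.2 p.2)
    · simp only [List.foldl_cons, pvMergeRec, if_neg h]
      rw [ih (acc ++ [cur]) (p.1, p.2)]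
      simp

-- Main lemma: running the gap fold over the merged blocks equals running it
-- over the pending block followed by the raw sorted tail.
theorem pvMain (L m : Int) (t : List (Int × Int)) :
    ∀ (cur : Int × Int) (acc : List (Int × Int)) (prev : Int),
    pvF L m (pvMergeRec t cur) acc prev = pvF L m (cur :: t) acc prev := by
  induction t with
  | nil => intro cur acc prev; rfl
  | cons p t ih =>
    intro cur acc prev
    by_cases h : p.1 ≤ cur.2
    -- absorbed element: A's gap test on p is vacuously false there
    · rw [pvMergeRec, if_pos h, ih]
      simp only [pvF_cons, pvGStep]
      have h1 : ¬ (p.1 > max prev cur.2 ∧ p.1 - max prev cur.2 ≥ m) := by omega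
      rw [if_neg h1]
      congr 1
      omega
    -- new block: both sides continue with p itself against the same state
    · rw [pvMergeRec, if_neg h]
      simp only [pvF_cons]
      rw [ih]
      simp only [pvF_cons, pvGStep]

theorem pvA_eq_F (L : Int) (rr : List (Int × Int)) (m : Int) (h : ¬ rr = []) :
    calculate_non_redundant_pieces L rr m
      = pvF L m (PySem.List.sorted2 rr Prod.fst Prod.snd) [] 0 := by
  simp only [calculate_non_redundant_pieces, if_neg h]
  rfl

theorem pv_sorted_ne_nil (rr : List (Int × Int)) (h : ¬ rr = []) :
    PySem.List.sorted2 rr Prod.fst Prod.snd ≠ [] := by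
  intro hs
  apply h
  have hp := PySem.List.sorted2_perm rr (Prod.fst : Int × Int → Int) (Prod.snd : Int × Int → Int) false
  rw [hs] at hp
  exact hp.symm.eq_nil

-- ===== VERDICT (by name: the statement is the Claim_ definition above) =====
theorem calculate_non_redundant_pieces_spec : Claim_equal_calculate_non_redundant_pieces := by
  intro L rr m _
  unfold Spec_calculate_non_redundant_pieces
  by_cases h : rr = []
  · simp [calculate_non_redundant_pieces, calculate_non_redundant_pieces_alt, h]
  · obtain ⟨c0, rest, hs⟩ : ∃ c0 rest, PySem.List.sorted2 rr Prod.fst Prod.snd = c0 :: rest := by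
      cases hh : PySem.List.sorted2 rr Prod.fst Prod.snd with
      | nil => exact absurd hh (pv_sorted_ne_nil rr h)
      | cons a b => exact ⟨a, b, rfl⟩
    rw [pvA_eq_F L rr m h, hs]
    simp only [calculate_non_redundant_pieces_alt, if_neg h, hs]
    have hm := pvMerge_fold rest [] c0
    rw [List.nil_append] at hm
    rw [← pvMain L m rest c0 [] 0, ← hm]
    rfl
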